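-- pv_equiv track=rewrite | github.com/samyogita/LeetCode-problems | checking_existence_of_edge_length_limited_paths.py | distanceLimitedPathsExist
-- ===== SOURCE A (Python) =====
-- from typing import List
--
-- def distanceLimitedPathsExist(n: int, edgeList: List[List[int]], queries: List[List[int]]) -> List[bool]:
--     rep, sz = list(range(n) ), [1] * n
--     def find(u):
--         if u != rep[u]:
--             rep[u] = find(rep[u])
--         return rep[u]
--     def merge(u, v):
--         u, v = find(u), find(v)
--         if u == v:
--             return
--         if sz[v] > sz[u]:
--             u, v = v, u
--         sz[u] += sz[v]
--         rep[v] = u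
--
--     edgeList.sort(key=lambda x:x[2])
--     queries = sorted( (d, u, v, i) for i, (u, v, d) in enumerate(queries) )
--     idx, res = 0, [False] * len(queries)
--     for d, u, v, i in queries:
--         while idx < len(edgeList) and edgeList[idx][2] < d:
--             merge(edgeList[idx][0], edgeList[idx][1])
--             idx += 1
--         res[i] = find(u) == find(v)
--     return res
-- ===== SOURCE B (Python) =====
-- from typing import List
--
-- # B: per-query component labelling -- no sorting, no union-find, no offline sweep.
-- # Note: A sorts edgeList in place; B does not mutate its arguments (return value is identical).
-- def distanceLimitedPathsExist(n: int, edgeList: List[List[int]], queries: List[List[int]]) -> List[bool]: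
--     res = []
--     for q in queries:
--         u, v, d = q[0], q[1], q[2]
--         label = list(range(n))
--         for e in edgeList:
--             if e[2] < d:
--                 la, lb = label[e[0]], label[e[1]]
--                 if la != lb:
--                     label = [la if x == lb else x for x in label]
--         res.append(label[u] == label[v])
--     return res
-- ===== Notes on version B (the rewrite author's own statement) =====
-- stated objective: simpler
-- what changed: B answers each query independently by one component-labelling pass over the unsorted edges (merging classes by rewriting a label array), replacing A's offline sweep that sorts edges and queries and maintains a path-compressed, union-by-size union-find.
import Mathlib
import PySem

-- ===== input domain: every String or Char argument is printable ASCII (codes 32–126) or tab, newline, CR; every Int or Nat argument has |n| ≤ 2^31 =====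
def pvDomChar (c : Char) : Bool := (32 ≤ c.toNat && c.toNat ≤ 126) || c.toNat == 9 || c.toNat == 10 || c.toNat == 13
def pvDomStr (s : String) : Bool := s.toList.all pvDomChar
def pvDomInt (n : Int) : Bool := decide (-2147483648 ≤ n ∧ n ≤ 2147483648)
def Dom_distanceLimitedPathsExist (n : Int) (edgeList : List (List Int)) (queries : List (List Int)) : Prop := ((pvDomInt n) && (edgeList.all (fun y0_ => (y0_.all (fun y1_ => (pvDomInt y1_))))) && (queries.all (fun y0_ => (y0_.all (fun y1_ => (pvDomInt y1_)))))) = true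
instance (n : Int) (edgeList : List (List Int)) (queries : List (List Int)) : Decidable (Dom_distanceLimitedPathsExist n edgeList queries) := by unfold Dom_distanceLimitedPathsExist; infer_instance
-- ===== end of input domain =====

-- B answers each query by an independent component-labelling pass over the edges (no sorting,
-- no union-find, no offline sweep); equivalence is about the RETURN value: A sorts edgeList in
-- place, B does not mutate its arguments.

-- ===== PORT A =====
-- find(u) with path compression; the Nat fuel only makes the recursion structural
-- (rep.length + 1 steps always suffice under Pre_, proved below)
def pvFind : Nat → List Int → Int → List Int × Int
  | 0, rep, u => (rep, u)
  | f+1, rep, u =>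
    let pu := PySem.List.pyGetD rep u 0
    if u ≠ pu then
      let s := pvFind f rep pu
      let rep2 := PySem.List.pySetD s.1 u s.2
      (rep2, PySem.List.pyGetD rep2 u 0)
    else (rep, pu)

def pvMerge (rep sz : List Int) (a b : Int) : List Int × List Int :=
  let s1 := pvFind (rep.length + 1) rep a
  let s2 := pvFind (s1.1.length + 1) s1.1 b
  let u := s1.2
  let v := s2.2
  let rep2 := s2.1
  if u = v then (rep2, sz)
  else
    let p := if PySem.List.pyGetD sz v 0 > PySem.List.pyGetD sz u 0 then (v, u) else (u, v)
    let sz' := PySem.List.pySetD sz p.1 (PySem.List.pyGetD sz p.1 0 + PySem.List.pyGetD sz p.2 0)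
    let rep3 := PySem.List.pySetD rep2 p.2 p.1
    (rep3, sz')

-- while idx < len(edgeList) and edgeList[idx][2] < d: merge(...); idx += 1
def pvWhile : Nat → List (List Int) → Int → List Int → List Int → Int → List Int × List Int × Int
  | 0, _, _, rep, sz, idx => (rep, sz, idx)
  | f+1, el, d, rep, sz, idx =>
    if idx < (el.length : Int) ∧ PySem.List.pyGetD (PySem.List.pyGetD el idx []) 2 0 < d then
      let e := PySem.List.pyGetD el idx []
      let ms := pvMerge rep sz (PySem.List.pyGetD e 0 0) (PySem.List.pyGetD e 1 0)
      pvWhile f el d ms.1 ms.2 (idx + 1)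
    else (rep, sz, idx)

-- body of the main query loop (state: rep, sz, idx, res)
def pvQStep (el : List (List Int)) (st : List Int × List Int × Int × List Bool) (q : List Int) :
    List Int × List Int × Int × List Bool :=
  let d := PySem.List.pyGetD q 0 0
  let u := PySem.List.pyGetD q 1 0
  let v := PySem.List.pyGetD q 2 0
  let i := PySem.List.pyGetD q 3 0
  let w := pvWhile el.length el d st.1 st.2.1 st.2.2.1
  let f1 := pvFind (w.1.length + 1) w.1 u
  let f2 := pvFind (f1.1.length + 1) f1.1 v
  (f2.1, w.2.1, w.2.2, PySem.List.pySetD st.2.2.2 i (decide (f1.2 = f2.2)))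

def distanceLimitedPathsExist (n : Int) (edgeList : List (List Int)) (queries : List (List Int)) : List Bool :=
  let rep := PySem.List.pyRange 0 n 1
  let sz := PySem.List.pyRepeat [1] n
  let el := PySem.List.sorted edgeList (fun x => PySem.List.pyGetD x 2 0) false
  let qt := (PySem.List.enumerate queries 0).map (fun p =>
      [PySem.List.pyGetD p.2 2 0, PySem.List.pyGetD p.2 0 0, PySem.List.pyGetD p.2 1 0, p.1])
  let qs := @PySem.List.sorted _ _ LinearOrder.toPartialOrder.toPreorder.toLT LinearOrder.toDecidableLT qt (fun x => x) false
  let res0 := PySem.List.pyRepeat [false] (qs.length : Int)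
  let st := qs.foldl (pvQStep el) (rep, sz, 0, res0)
  st.2.2.2

-- ===== PORT B =====
def pvStep (d : Int) (label : List Int) (e : List Int) : List Int :=
  if PySem.List.pyGetD e 2 0 < d then
    let la := PySem.List.pyGetD label (PySem.List.pyGetD e 0 0) 0
    let lb := PySem.List.pyGetD label (PySem.List.pyGetD e 1 0) 0
    if la ≠ lb then label.map (fun x => if x = lb then la else x) else label
  else label

def pvAns (n : Int) (edgeList : List (List Int)) (q : List Int) : Bool :=
  let u := PySem.List.pyGetD q 0 0
  let v := PySem.List.pyGetD q 1 0
  let d := PySem.List.pyGetD q 2 0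
  let label := edgeList.foldl (pvStep d) (PySem.List.pyRange 0 n 1)
  decide (PySem.List.pyGetD label u 0 = PySem.List.pyGetD label v 0)

def distanceLimitedPathsExist_alt (n : Int) (edgeList : List (List Int)) (queries : List (List Int)) : List Bool :=
  queries.foldl (fun res q => res ++ [pvAns n edgeList q]) []

-- ===== PRECONDITION & SPEC =====
-- Pre_ admits exactly the inputs on which A returns: every edge row has ≥ 3 entries, every query
-- row exactly 3, every query endpoint id is in [-n, n) (Python's list indexing accepts these,
-- reading position id+n for negative ids; both ports reproduce that), and so is every endpoint of
-- an edge whose weight is below some query limit — an edge that no query limit exceeds is never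
-- dereferenced by either program, so its endpoints may be arbitrary.  Outside Pre_ A raises
-- (ValueError or IndexError).
def Pre_distanceLimitedPathsExist (n : Int) (edgeList : List (List Int)) (queries : List (List Int)) : Prop :=
  (∀ e ∈ edgeList, 3 ≤ e.length ∧
      (((-n ≤ PySem.List.pyGetD e 0 0 ∧ PySem.List.pyGetD e 0 0 < n) ∧
        (-n ≤ PySem.List.pyGetD e 1 0 ∧ PySem.List.pyGetD e 1 0 < n)) ∨
       (∀ q ∈ queries, PySem.List.pyGetD q 2 0 ≤ PySem.List.pyGetD e 2 0))) ∧
  (∀ q ∈ queries, q.length = 3 ∧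
      (-n ≤ PySem.List.pyGetD q 0 0 ∧ PySem.List.pyGetD q 0 0 < n) ∧
      (-n ≤ PySem.List.pyGetD q 1 0 ∧ PySem.List.pyGetD q 1 0 < n))
instance (n : Int) (edgeList : List (List Int)) (queries : List (List Int)) : Decidable (Pre_distanceLimitedPathsExist n edgeList queries) := by unfold Pre_distanceLimitedPathsExist; infer_instance

def pvWitness_distanceLimitedPathsExist : Int × List (List Int) × List (List Int) :=
  (3, [[0, 1, 4], [1, 2, 10]], [[0, 2, 5], [0, 2, 20], [-1, 0, 11]])

def Spec_distanceLimitedPathsExist (n : Int) (edgeList : List (List Int)) (queries : List (List Int)) (out : List Bool) : Prop := out = distanceLimitedPathsExist_alt n edgeList queries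
instance (n : Int) (edgeList : List (List Int)) (queries : List (List Int)) (out : List Bool) : Decidable (Spec_distanceLimitedPathsExist n edgeList queries out) := by unfold Spec_distanceLimitedPathsExist; infer_instance

-- ===== CLAIM (what is proved, stated in full; the proofs are below) =====
def Claim_equal_distanceLimitedPathsExist : Prop := ∀ (n : Int) (edgeList : List (List Int)) (queries : List (List Int)), Dom_distanceLimitedPathsExist n edgeList queries → Pre_distanceLimitedPathsExist n edgeList queries → Spec_distanceLimitedPathsExist n edgeList queries (distanceLimitedPathsExist n edgeList queries)

-- ===== LEMMAS AND PROOFS =====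

-- notation-level helpers about the two programs
def pvKey (e : List Int) : Int := PySem.List.pyGetD e 2 0
def pvE0 (e : List Int) : Int := PySem.List.pyGetD e 0 0
def pvE1 (e : List Int) : Int := PySem.List.pyGetD e 1 0
def pvSlot (n u : Int) : Int := if u < 0 then u + n else u
def pvInR (n u : Int) : Prop := -n ≤ u ∧ u < n
def pvCanon (n u : Int) : Prop := 0 ≤ u ∧ u < n
def pvGood (n : Int) (rep : List Int) : Prop := ((rep.length : Int) = n) ∧ ∀ x ∈ rep, 0 ≤ x ∧ x < n
def pvIter (rep : List Int) : Nat → Int → Int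
  | 0, u => u
  | k+1, u => pvIter rep k (PySem.List.pyGetD rep u 0)
def pvIsRoot (rep : List Int) (u : Int) : Prop := PySem.List.pyGetD rep u 0 = u
def pvTerm (n : Int) (rep : List Int) : Prop := ∀ x, pvCanon n x → ∃ k, pvIsRoot rep (pvIter rep k x)
def pvRt (rep : List Int) (u : Int) : Int := pvIter rep rep.length u
def pvUF (n : Int) (rep : List Int) : Prop := pvGood n rep ∧ pvTerm n rep
-- pair relation generated by an edge list, on canonical slots, and its equivalence closure
def pvPR (n : Int) (E : List (List Int)) (a b : Int) : Prop :=
  ∃ e ∈ E, a = pvSlot n (pvE0 e) ∧ b = pvSlot n (pvE1 e)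
def pvConn (n : Int) (E : List (List Int)) (x y : Int) : Prop := Relation.EqvGen (pvPR n E) x y

theorem pvE0_eq (e : List Int) : PySem.List.pyGetD e 0 0 = pvE0 e := rfl
theorem pvE1_eq (e : List Int) : PySem.List.pyGetD e 1 0 = pvE1 e := rfl
theorem pvKey_eq (e : List Int) : PySem.List.pyGetD e 2 0 = pvKey e := rfl

-- ---- indexing / wraparound basics ----
theorem pvIdx_eq {n : Int} {len : Nat} (hl : (len : Int) = n) {u : Int} (hu : pvInR n u) :
    PySem.List.pyIdx? len u = some (pvSlot n u).toNat := by
  obtain ⟨h1, h2⟩ := hu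
  simp only [PySem.List.pyIdx?, pvSlot]
  split_ifs with a b c <;> first | omega | (congr 1; omega) | rfl
theorem pvSlot_canon {n u : Int} (h : pvInR n u) : pvCanon n (pvSlot n u) := by
  obtain ⟨h1,h2⟩ := h; unfold pvSlot pvCanon; split_ifs <;> omega
theorem pvCanon_inR {n u : Int} (h : pvCanon n u) : pvInR n u := by
  obtain ⟨h1,h2⟩ := h; exact ⟨by omega, h2⟩
theorem pvCanon_slot {n u : Int} (h : pvCanon n u) : pvSlot n u = u := by
  obtain ⟨h1,h2⟩ := h; unfold pvSlot; split_ifs <;> omega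
theorem pvGetD_canon {n : Int} {rep : List Int} (hl : (rep.length : Int) = n) {x : Int}
    (hx : pvCanon n x) : PySem.List.pyGetD rep x 0 = rep.getD x.toNat 0 := by
  have := pvIdx_eq hl (pvCanon_inR hx)
  rw [pvCanon_slot hx] at this
  simp [PySem.List.pyGetD, PySem.List.pyGet?, this, List.getD]
theorem pvGetD_wrap {n : Int} {rep : List Int} (hl : (rep.length : Int) = n) {u : Int}
    (hu : pvInR n u) : PySem.List.pyGetD rep u 0 = PySem.List.pyGetD rep (pvSlot n u) 0 := by
  have h1 := pvIdx_eq hl hu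
  have h2 := pvIdx_eq hl (pvCanon_inR (pvSlot_canon hu))
  rw [pvCanon_slot (pvSlot_canon hu)] at h2
  simp [PySem.List.pyGetD, PySem.List.pyGet?, h1, h2]
theorem pvSetD_wrap {n : Int} {rep : List Int} (hl : (rep.length : Int) = n) {u : Int}
    (hu : pvInR n u) (v : Int) : PySem.List.pySetD rep u v = PySem.List.pySetD rep (pvSlot n u) v := by
  have h1 := pvIdx_eq hl hu
  have h2 := pvIdx_eq hl (pvCanon_inR (pvSlot_canon hu))
  rw [pvCanon_slot (pvSlot_canon hu)] at h2
  simp [PySem.List.pySetD, PySem.List.pySet?, h1, h2]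
theorem pvGetD_mem_of_canon {n : Int} {rep : List Int} (hl : (rep.length : Int) = n) {x : Int}
    (hx : pvCanon n x) : PySem.List.pyGetD rep x 0 ∈ rep := by
  rw [pvGetD_canon hl hx]
  have : x.toNat < rep.length := by obtain ⟨a,b⟩ := hx; omega
  rw [List.getD_eq_getElem _ _ this]; exact List.getElem_mem this
theorem pvLen_setD (rep : List Int) (s v : Int) :
    ((PySem.List.pySetD rep s v).length : Int) = (rep.length : Int) := by
  simp [PySem.List.pySetD, PySem.List.pySet?, PySem.List.pyIdx?]
  split_ifs <;> simp
theorem pvGetD_setD_canon {n : Int} {rep : List Int} (hl : (rep.length : Int) = n)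
    {x s : Int} (hx : pvCanon n x) (hs : pvCanon n s) (v : Int) :
    PySem.List.pyGetD (PySem.List.pySetD rep s v) x 0 = if x = s then v else PySem.List.pyGetD rep x 0 := by
  have hsd : PySem.List.pySetD rep s v = rep.set s.toNat v := by
    have h1 := pvIdx_eq hl (pvCanon_inR hs)
    rw [pvCanon_slot hs] at h1
    simp [PySem.List.pySetD, PySem.List.pySet?, h1]
  have hl2 : ((rep.set s.toNat v).length : Int) = n := by simp [hl]
  rw [hsd, pvGetD_canon hl2 hx, pvGetD_canon hl hx]
  rcases eq_or_ne x s with h | h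
  · subst h
    have : x.toNat < rep.length := by obtain ⟨a,b⟩ := hx; omega
    simp [List.getD_eq_getElem _ _ (by simpa using this), List.getElem_set_self, this]
  · have hne : x.toNat ≠ s.toNat := by obtain ⟨a,_⟩ := hx; obtain ⟨c,_⟩ := hs; omega
    rw [if_neg h]
    unfold List.getD
    rw [List.getElem?_set_ne (by omega)]

theorem pvF_canon {n : Int} {rep : List Int} (hg : pvGood n rep) {x : Int} (hx : pvCanon n x) :
    pvCanon n (PySem.List.pyGetD rep x 0) := hg.2 _ (pvGetD_mem_of_canon hg.1 hx)

-- ---- iteration basics ----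
theorem pvIter_add (rep : List Int) (j k : Nat) (u : Int) :
    pvIter rep (j + k) u = pvIter rep k (pvIter rep j u) := by
  induction j generalizing u with
  | zero => simp [pvIter]
  | succ j ih => rw [Nat.succ_add]; exact ih _
theorem pvIter_root {rep : List Int} {r : Int} (h : pvIsRoot rep r) (k : Nat) :
    pvIter rep k r = r := by
  induction k with
  | zero => rfl
  | succ k ih => unfold pvIter; rw [h]; exact ih
theorem pvIter_canon {n : Int} {rep : List Int} (hg : pvGood n rep) {x : Int} (hx : pvCanon n x)
    (k : Nat) : pvCanon n (pvIter rep k x) := by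
  induction k generalizing x with
  | zero => exact hx
  | succ k ih => exact ih (pvF_canon hg hx)

theorem pvIter_congr (rep : List Int) {a b : Nat} (h : a = b) (u : Int) :
    pvIter rep a u = pvIter rep b u := by rw [h]

theorem pvRt_isRoot {n : Int} {rep : List Int} (h : pvUF n rep) {x : Int} (hx : pvCanon n x) :
    pvIsRoot rep (pvRt rep x) := by
  obtain ⟨hg, ht⟩ := h
  letI : DecidablePred (fun k => pvIsRoot rep (pvIter rep k x)) := fun k => by
    unfold pvIsRoot; infer_instance
  have hP : ∃ k, pvIsRoot rep (pvIter rep k x) := ht x hx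
  have hm : pvIsRoot rep (pvIter rep (Nat.find hP) x) := Nat.find_spec hP
  have hmin : ∀ j < Nat.find hP, ¬ pvIsRoot rep (pvIter rep j x) := fun j hj => Nat.find_min hP hj
  have key : ∀ i j : Nat, i < j → j ≤ Nat.find hP → pvIter rep i x = pvIter rep j x → False := by
    intro i j hlt hle heq
    have e1 : pvIter rep (j + (Nat.find hP - j)) x = pvIter rep (Nat.find hP) x :=
      pvIter_congr rep (by omega) x
    have e2 : pvIter rep (i + (Nat.find hP - j)) x = pvIter rep (Nat.find hP - j) (pvIter rep i x) :=
      pvIter_add rep i (Nat.find hP - j) x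
    have e3 : pvIter rep (j + (Nat.find hP - j)) x = pvIter rep (Nat.find hP - j) (pvIter rep j x) :=
      pvIter_add rep j (Nat.find hP - j) x
    have hroot : pvIsRoot rep (pvIter rep (i + (Nat.find hP - j)) x) := by
      rw [e2, heq, ← e3, e1]; exact hm
    exact hmin _ (by omega) hroot
  have hle : Nat.find hP ≤ rep.length := by
    by_contra hgt
    push_neg at hgt
    have hinj : Set.InjOn (fun i => pvIter rep i x) (Finset.range (Nat.find hP + 1)) := by
      intro i hi j hj hij
      simp only [Finset.coe_range, Set.mem_Iio] at hi hj
      have hij' : pvIter rep i x = pvIter rep j x := hij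
      by_contra hne
      rcases Nat.lt_or_ge i j with hlt | hge
      · exact key i j hlt (by omega) hij'
      · exact key j i (by omega) (by omega) hij'.symm
    have hsub : ∀ i ∈ Finset.range (Nat.find hP + 1), pvIter rep i x ∈ Finset.Ico (0 : Int) n := by
      intro i _
      have := pvIter_canon hg hx i
      simpa [Finset.mem_Ico] using this
    have hcard := Finset.card_le_card_of_injOn _ hsub hinj
    simp only [Finset.card_range, Int.card_Ico] at hcard
    have : n = (rep.length : Int) := hg.1.symm
    omega
  unfold pvRt
  have e : pvIter rep rep.length x = pvIter rep (rep.length - Nat.find hP) (pvIter rep (Nat.find hP) x) := by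
    rw [← pvIter_add]; exact pvIter_congr rep (by omega) x
  rw [e, pvIter_root hm]
  exact hm

theorem pvRoot_unique {n : Int} {rep : List Int} (h : pvUF n rep) {x y : Int} (hx : pvCanon n x)
    {k : Nat} (hk : pvIter rep k x = y) (hy : pvIsRoot rep y) : pvRt rep x = y := by
  have h1 : pvIter rep (k + rep.length) x = pvIter rep rep.length y := by rw [pvIter_add, hk]
  rw [pvIter_root hy] at h1
  have h2 : pvIter rep (rep.length + k) x = pvIter rep k (pvRt rep x) := by rw [pvIter_add]; rfl
  rw [pvIter_root (pvRt_isRoot h hx)] at h2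
  have : pvIter rep (k + rep.length) x = pvIter rep (rep.length + k) x := by congr 1; omega
  unfold pvRt at h2 ⊢; rw [← h2, ← this]; exact h1

theorem pvRt_F {n : Int} {rep : List Int} (h : pvUF n rep) {x : Int} (hx : pvCanon n x) :
    pvRt rep (PySem.List.pyGetD rep x 0) = pvRt rep x := by
  have hr := pvRt_isRoot h hx
  have e2 : pvIter rep (rep.length + 1) x = pvIter rep rep.length (PySem.List.pyGetD rep x 0) := rfl
  unfold pvRt
  rw [← e2, pvIter_add rep rep.length 1 x]
  show pvIter rep 1 (pvRt rep x) = pvRt rep x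
  simpa [pvIter] using hr

theorem pvRt_canon {n : Int} {rep : List Int} (h : pvUF n rep) {x : Int} (hx : pvCanon n x) :
    pvCanon n (pvRt rep x) := pvIter_canon h.1 hx _

theorem pvRt_of_isRoot {n : Int} {rep : List Int} (h : pvUF n rep) {x : Int} (hx : pvCanon n x)
    (hr : pvIsRoot rep x) : pvRt rep x = x := pvIter_root hr _

theorem pvSetD_canon {n : Int} {rep : List Int} (hl : (rep.length : Int) = n) {s : Int}
    (hs : pvCanon n s) (v : Int) : PySem.List.pySetD rep s v = rep.set s.toNat v := by
  have h1 := pvIdx_eq hl (pvCanon_inR hs)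
  rw [pvCanon_slot hs] at h1
  simp [PySem.List.pySetD, PySem.List.pySet?, h1]

-- ---- path compression step ----
theorem pvCompress {n : Int} {rep : List Int} (h : pvUF n rep) {s : Int} (hs : pvCanon n s) :
    pvUF n (PySem.List.pySetD rep s (pvRt rep s)) ∧
    (((PySem.List.pySetD rep s (pvRt rep s)).length : Int) = n) ∧
    ∀ x, pvCanon n x → pvRt (PySem.List.pySetD rep s (pvRt rep s)) x = pvRt rep x := by
  obtain ⟨hg, ht⟩ := h
  set r := pvRt rep s with hr
  set rep' := PySem.List.pySetD rep s r with hrep'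
  have hlen' : ((rep'.length : Int)) = n := by rw [hrep', pvLen_setD, hg.1]
  have hF' : ∀ x, pvCanon n x →
      PySem.List.pyGetD rep' x 0 = if x = s then r else PySem.List.pyGetD rep x 0 := by
    intro x hx; exact pvGetD_setD_canon hg.1 hx hs r
  have hrcanon : pvCanon n r := pvRt_canon ⟨hg, ht⟩ hs
  have hgood' : pvGood n rep' := by
    refine ⟨hlen', ?_⟩
    intro x hxmem
    rw [hrep', pvSetD_canon hg.1 hs] at hxmem
    rcases List.mem_or_eq_of_mem_set hxmem with hmem | heq
    · exact hg.2 x hmem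
    · subst heq; exact hrcanon
  have hroot' : ∀ x, pvCanon n x → pvIsRoot rep' (pvRt rep x) := by
    intro x hx
    have hrx : pvIsRoot rep (pvRt rep x) := pvRt_isRoot ⟨hg, ht⟩ hx
    have hrxc : pvCanon n (pvRt rep x) := pvRt_canon ⟨hg, ht⟩ hx
    unfold pvIsRoot
    rw [hF' _ hrxc]
    split_ifs with hxs
    · rw [hxs]
      have : r = s := by rw [hr]; exact hxs ▸ pvRt_of_isRoot ⟨hg, ht⟩ (hxs ▸ hrxc) (hxs ▸ hrx)
      exact this
    · exact hrx
  have hreach : ∀ m x, pvCanon n x → pvIsRoot rep (pvIter rep m x) →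
      ∃ k, pvIter rep' k x = pvRt rep x := by
    intro m
    induction m with
    | zero =>
      intro x hx hroot
      exact ⟨0, (pvRt_of_isRoot ⟨hg, ht⟩ hx hroot).symm⟩
    | succ m ih =>
      intro x hx hroot
      by_cases hxr : pvIsRoot rep x
      · exact ⟨0, (pvRt_of_isRoot ⟨hg, ht⟩ hx hxr).symm⟩
      by_cases hxs : x = s
      · refine ⟨1, ?_⟩
        have : pvIter rep' 1 x = PySem.List.pyGetD rep' x 0 := rfl
        rw [this, hF' _ hx, if_pos hxs, hr, hxs]
      · have hfx : pvCanon n (PySem.List.pyGetD rep x 0) := pvF_canon hg hx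
        have hroot2 : pvIsRoot rep (pvIter rep m (PySem.List.pyGetD rep x 0)) := hroot
        obtain ⟨k, hk⟩ := ih _ hfx hroot2
        refine ⟨k + 1, ?_⟩
        have e : pvIter rep' (k+1) x = pvIter rep' k (PySem.List.pyGetD rep' x 0) := by
          rw [Nat.add_comm, pvIter_add]; rfl
        rw [e, hF' _ hx, if_neg hxs, hk, pvRt_F ⟨hg, ht⟩ hx]
  have hterm' : pvTerm n rep' := by
    intro x hx
    obtain ⟨m, hm⟩ := ht x hx
    obtain ⟨k, hk⟩ := hreach m x hx hm
    exact ⟨k, by rw [hk]; exact hroot' x hx⟩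
  refine ⟨⟨hgood', hterm'⟩, hlen', ?_⟩
  intro x hx
  obtain ⟨m, hm⟩ := ht x hx
  obtain ⟨k, hk⟩ := hreach m x hx hm
  exact pvRoot_unique ⟨hgood', hterm'⟩ hx hk (hroot' x hx)

-- ---- find ----
theorem pvFind_spec_canon {n : Int} : ∀ (f : Nat) (rep : List Int) (u : Int), pvUF n rep →
    pvCanon n u → (∃ k ≤ f, pvIsRoot rep (pvIter rep k u)) →
    pvUF n (pvFind f rep u).1 ∧ (((pvFind f rep u).1.length : Int) = n) ∧
    (pvFind f rep u).2 = pvRt rep u ∧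
    ∀ x, pvCanon n x → pvRt (pvFind f rep u).1 x = pvRt rep x := by
  intro f
  induction f with
  | zero =>
    intro rep u h hu hk
    obtain ⟨k, hk0, hk⟩ := hk
    interval_cases k
    have hRt : pvRt rep u = u := pvRt_of_isRoot h hu hk
    have e : pvFind 0 rep u = (rep, u) := rfl
    rw [e]
    exact ⟨h, h.1.1, hRt.symm, fun x _ => rfl⟩
  | succ f ih =>
    intro rep u h hu hk
    by_cases hupu : u = PySem.List.pyGetD rep u 0
    · have hroot : pvIsRoot rep u := hupu.symm
      have : pvFind (f+1) rep u = (rep, PySem.List.pyGetD rep u 0) := by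
        simp only [pvFind]; rw [if_neg (not_ne_iff.mpr hupu)]
      rw [this]
      refine ⟨h, h.1.1, ?_, fun x _ => rfl⟩
      simp only [← hupu]
      exact (pvRt_of_isRoot h hu hroot).symm
    · have hne : u ≠ PySem.List.pyGetD rep u 0 := hupu
      have heq : pvFind (f+1) rep u =
          (PySem.List.pySetD (pvFind f rep (PySem.List.pyGetD rep u 0)).1 u (pvFind f rep (PySem.List.pyGetD rep u 0)).2,
           PySem.List.pyGetD (PySem.List.pySetD (pvFind f rep (PySem.List.pyGetD rep u 0)).1 u (pvFind f rep (PySem.List.pyGetD rep u 0)).2) u 0) := by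
        simp only [pvFind, if_pos hne]
      have hpu : pvCanon n (PySem.List.pyGetD rep u 0) := pvF_canon h.1 hu
      have hk' : ∃ k ≤ f, pvIsRoot rep (pvIter rep k (PySem.List.pyGetD rep u 0)) := by
        obtain ⟨k, hkf, hk⟩ := hk
        match k with
        | 0 => exact absurd hk.symm hupu
        | k+1 => exact ⟨k, by omega, hk⟩
      obtain ⟨hUF1, hlen1, hval1, hpres1⟩ := ih rep (PySem.List.pyGetD rep u 0) h hpu hk'
      set s := pvFind f rep (PySem.List.pyGetD rep u 0) with hs
      have hval1' : s.2 = pvRt s.1 u := by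
        rw [hval1, pvRt_F h hu, ← hpres1 u hu]
      obtain ⟨hUF2, hlen2, hpres2⟩ := pvCompress (s := u) hUF1 hu
      rw [← hval1'] at hUF2 hlen2 hpres2
      rw [heq]
      refine ⟨hUF2, hlen2, ?_, ?_⟩
      · have : PySem.List.pyGetD (PySem.List.pySetD s.1 u s.2) u 0 = s.2 := by
          rw [pvGetD_setD_canon hlen1 hu hu, if_pos rfl]
        rw [this, hval1, pvRt_F h hu]
      · intro x hx
        rw [hpres2 x hx, hpres1 x hx]

theorem pvFind_kbound {n : Int} {rep : List Int} (h : pvUF n rep) {u : Int} (hu : pvCanon n u) :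
    ∃ k ≤ rep.length, pvIsRoot rep (pvIter rep k u) :=
  ⟨rep.length, le_refl _, pvRt_isRoot h hu⟩

theorem pvFind_spec' {n : Int} (rep : List Int) (u : Int) (h : pvUF n rep) (hu : pvInR n u) :
    pvUF n (pvFind (rep.length + 1) rep u).1 ∧ (((pvFind (rep.length + 1) rep u).1.length : Int) = n) ∧
    (pvFind (rep.length + 1) rep u).2 = pvRt rep (pvSlot n u) ∧
    ∀ x, pvCanon n x → pvRt (pvFind (rep.length + 1) rep u).1 x = pvRt rep x := by
  by_cases hneg : 0 ≤ u
  · have hcu : pvCanon n u := ⟨hneg, hu.2⟩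
    have hslot : pvSlot n u = u := pvCanon_slot hcu
    rw [hslot]
    exact pvFind_spec_canon (rep.length + 1) rep u h hcu
      (let ⟨k, hk1, hk2⟩ := pvFind_kbound h hcu; ⟨k, by omega, hk2⟩)
  · push_neg at hneg
    have hsc : pvCanon n (pvSlot n u) := pvSlot_canon hu
    have hwrap : PySem.List.pyGetD rep u 0 = PySem.List.pyGetD rep (pvSlot n u) 0 :=
      pvGetD_wrap h.1.1 hu
    have hpu : pvCanon n (PySem.List.pyGetD rep u 0) := by
      rw [hwrap]; exact pvF_canon h.1 hsc
    have hne : u ≠ PySem.List.pyGetD rep u 0 := by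
      intro hcontra; have := hpu.1; omega
    have heq : pvFind (rep.length + 1) rep u =
        (PySem.List.pySetD (pvFind rep.length rep (PySem.List.pyGetD rep u 0)).1 u (pvFind rep.length rep (PySem.List.pyGetD rep u 0)).2,
         PySem.List.pyGetD (PySem.List.pySetD (pvFind rep.length rep (PySem.List.pyGetD rep u 0)).1 u (pvFind rep.length rep (PySem.List.pyGetD rep u 0)).2) u 0) := by
      simp only [pvFind, if_pos hne]
    have hk' : ∃ k ≤ rep.length, pvIsRoot rep (pvIter rep k (PySem.List.pyGetD rep u 0)) :=
      pvFind_kbound h hpu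
    obtain ⟨hUF1, hlen1, hval1, hpres1⟩ := pvFind_spec_canon rep.length rep _ h hpu hk'
    set s := pvFind rep.length rep (PySem.List.pyGetD rep u 0) with hs
    have hvalslot : s.2 = pvRt rep (pvSlot n u) := by
      rw [hval1, hwrap, pvRt_F h hsc]
    have hval1' : s.2 = pvRt s.1 (pvSlot n u) := by
      rw [hvalslot, ← hpres1 _ hsc]
    have hsetwrap : PySem.List.pySetD s.1 u s.2 = PySem.List.pySetD s.1 (pvSlot n u) s.2 :=
      pvSetD_wrap hlen1 hu s.2
    obtain ⟨hUF2, hlen2, hpres2⟩ := pvCompress (s := pvSlot n u) hUF1 hsc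
    rw [← hval1'] at hUF2 hlen2 hpres2
    rw [heq, hsetwrap]
    refine ⟨hUF2, hlen2, ?_, ?_⟩
    · have hgw : PySem.List.pyGetD (PySem.List.pySetD s.1 (pvSlot n u) s.2) u 0 =
          PySem.List.pyGetD (PySem.List.pySetD s.1 (pvSlot n u) s.2) (pvSlot n u) 0 := by
        apply pvGetD_wrap (n := n) _ hu
        rw [pvLen_setD]; exact hlen1
      rw [hgw, pvGetD_setD_canon hlen1 hsc hsc, if_pos rfl, hvalslot]
    · intro x hx
      rw [hpres2 x hx, hpres1 x hx]

-- ---- linking two distinct roots ----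
theorem pvLink {n : Int} {R : List Int} (h : pvUF n R) {p q : Int} (hp : pvCanon n p)
    (hq : pvCanon n q) (hrp : pvIsRoot R p) (hrq : pvIsRoot R q) (hpq : p ≠ q) :
    pvUF n (PySem.List.pySetD R q p) ∧
    ∀ x, pvCanon n x → pvRt (PySem.List.pySetD R q p) x = (if pvRt R x = q then p else pvRt R x) := by
  obtain ⟨hg, ht⟩ := h
  set R3 := PySem.List.pySetD R q p with hR3
  have hlen3 : ((R3.length : Int)) = n := by rw [hR3, pvLen_setD, hg.1]
  have hF3 : ∀ x, pvCanon n x →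
      PySem.List.pyGetD R3 x 0 = if x = q then p else PySem.List.pyGetD R x 0 := by
    intro x hx; exact pvGetD_setD_canon hg.1 hx hq p
  have hgood3 : pvGood n R3 := by
    refine ⟨hlen3, ?_⟩
    intro x hxmem
    rw [hR3, pvSetD_canon hg.1 hq] at hxmem
    rcases List.mem_or_eq_of_mem_set hxmem with hmem | heq
    · exact hg.2 x hmem
    · subst heq; exact hp
  have hroot3 : ∀ x, pvCanon n x →
      pvIsRoot R3 (if pvRt R x = q then p else pvRt R x) := by
    intro x hx
    have hrx : pvIsRoot R (pvRt R x) := pvRt_isRoot ⟨hg, ht⟩ hx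
    have hrxc : pvCanon n (pvRt R x) := pvRt_canon ⟨hg, ht⟩ hx
    split_ifs with hxq
    · unfold pvIsRoot; rw [hF3 _ hp, if_neg hpq]; exact hrp
    · unfold pvIsRoot; rw [hF3 _ hrxc, if_neg hxq]; exact hrx
  have hreach : ∀ m x, pvCanon n x → pvIsRoot R (pvIter R m x) →
      ∃ k, pvIter R3 k x = (if pvRt R x = q then p else pvRt R x) := by
    intro m
    induction m with
    | zero =>
      intro x hx hroot
      have hRtx : pvRt R x = x := pvRt_of_isRoot ⟨hg, ht⟩ hx hroot
      by_cases hxq : x = q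
      · refine ⟨1, ?_⟩
        have e : pvIter R3 1 x = PySem.List.pyGetD R3 x 0 := rfl
        rw [e, hF3 _ hx, if_pos hxq, hRtx, if_pos hxq]
      · exact ⟨0, by rw [hRtx, if_neg hxq]; rfl⟩
    | succ m ih =>
      intro x hx hroot
      by_cases hxr : pvIsRoot R x
      · have hRtx : pvRt R x = x := pvRt_of_isRoot ⟨hg, ht⟩ hx hxr
        by_cases hxq : x = q
        · refine ⟨1, ?_⟩
          have e : pvIter R3 1 x = PySem.List.pyGetD R3 x 0 := rfl
          rw [e, hF3 _ hx, if_pos hxq, hRtx, if_pos hxq]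
        · exact ⟨0, by rw [hRtx, if_neg hxq]; rfl⟩
      · have hxq : x ≠ q := fun hcontra => hxr (hcontra ▸ hrq)
        have hfx : pvCanon n (PySem.List.pyGetD R x 0) := pvF_canon hg hx
        obtain ⟨k, hk⟩ := ih _ hfx hroot
        refine ⟨k + 1, ?_⟩
        have e : pvIter R3 (k+1) x = pvIter R3 k (PySem.List.pyGetD R3 x 0) := by
          rw [Nat.add_comm, pvIter_add]; rfl
        rw [e, hF3 _ hx, if_neg hxq, hk, pvRt_F ⟨hg, ht⟩ hx]
  have hterm3 : pvTerm n R3 := by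
    intro x hx
    obtain ⟨m, hm⟩ := ht x hx
    obtain ⟨k, hk⟩ := hreach m x hx hm
    exact ⟨k, by rw [hk]; exact hroot3 x hx⟩
  refine ⟨⟨hgood3, hterm3⟩, ?_⟩
  intro x hx
  obtain ⟨m, hm⟩ := ht x hx
  obtain ⟨k, hk⟩ := hreach m x hx hm
  exact pvRoot_unique ⟨hgood3, hterm3⟩ hx hk (hroot3 x hx)

theorem pvLink_iff {p q s t : Int} (hpq : p ≠ q) :
    ((if s = q then p else s) = (if t = q then p else t)) ↔
      (s = t ∨ (s = p ∧ q = t) ∨ (s = q ∧ p = t)) := by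
  split_ifs <;> omega

-- ---- merge ----
theorem pvMerge_spec {n : Int} (rep sz : List Int) (a b : Int) (h : pvUF n rep)
    (ha : pvInR n a) (hb : pvInR n b) :
    pvUF n (pvMerge rep sz a b).1 ∧
    ∀ x y, pvCanon n x → pvCanon n y →
      (pvRt (pvMerge rep sz a b).1 x = pvRt (pvMerge rep sz a b).1 y ↔
        (pvRt rep x = pvRt rep y ∨
         (pvRt rep x = pvRt rep (pvSlot n a) ∧ pvRt rep (pvSlot n b) = pvRt rep y) ∨
         (pvRt rep x = pvRt rep (pvSlot n b) ∧ pvRt rep (pvSlot n a) = pvRt rep y))) := by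
  obtain ⟨hUF1, hlen1, hval1, hpres1⟩ := pvFind_spec' rep a h ha
  set s1 := pvFind (rep.length + 1) rep a with hs1
  obtain ⟨hUF2, hlen2, hval2, hpres2⟩ := pvFind_spec' s1.1 b hUF1 hb
  set s2 := pvFind (s1.1.length + 1) s1.1 b with hs2
  have hpres12 : ∀ x, pvCanon n x → pvRt s2.1 x = pvRt rep x := by
    intro x hx; rw [hpres2 x hx, hpres1 x hx]
  have hsa : pvCanon n (pvSlot n a) := pvSlot_canon ha
  have hsb : pvCanon n (pvSlot n b) := pvSlot_canon hb
  have hvra : s1.2 = pvRt rep (pvSlot n a) := hval1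
  have hvrb : s2.2 = pvRt rep (pvSlot n b) := by rw [hval2, hpres1 _ hsb]
  have hrac : pvCanon n (pvRt rep (pvSlot n a)) := pvRt_canon h hsa
  have hrbc : pvCanon n (pvRt rep (pvSlot n b)) := pvRt_canon h hsb
  have hroota : pvIsRoot s2.1 (pvRt rep (pvSlot n a)) := by
    rw [← hpres12 _ hsa]; exact pvRt_isRoot hUF2 hsa
  have hrootb : pvIsRoot s2.1 (pvRt rep (pvSlot n b)) := by
    rw [← hpres12 _ hsb]; exact pvRt_isRoot hUF2 hsb
  have hmerge : pvMerge rep sz a b =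
      (if s1.2 = s2.2 then (s2.1, sz)
       else
        ((PySem.List.pySetD s2.1
          (if PySem.List.pyGetD sz s2.2 0 > PySem.List.pyGetD sz s1.2 0 then (s2.2, s1.2) else (s1.2, s2.2)).2
          (if PySem.List.pyGetD sz s2.2 0 > PySem.List.pyGetD sz s1.2 0 then (s2.2, s1.2) else (s1.2, s2.2)).1),
         (PySem.List.pySetD sz
          (if PySem.List.pyGetD sz s2.2 0 > PySem.List.pyGetD sz s1.2 0 then (s2.2, s1.2) else (s1.2, s2.2)).1
          (PySem.List.pyGetD sz (if PySem.List.pyGetD sz s2.2 0 > PySem.List.pyGetD sz s1.2 0 then (s2.2, s1.2) else (s1.2, s2.2)).1 0 +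
           PySem.List.pyGetD sz (if PySem.List.pyGetD sz s2.2 0 > PySem.List.pyGetD sz s1.2 0 then (s2.2, s1.2) else (s1.2, s2.2)).2 0)))) := rfl
  by_cases heq : s1.2 = s2.2
  · rw [hmerge, if_pos heq]
    refine ⟨hUF2, ?_⟩
    intro x y hx hy
    simp only
    rw [hpres12 x hx, hpres12 y hy]
    have hab : pvRt rep (pvSlot n a) = pvRt rep (pvSlot n b) := by rw [← hvra, ← hvrb, heq]
    constructor
    · exact fun hxy => Or.inl hxy
    · rintro (hxy | ⟨h1, h2⟩ | ⟨h1, h2⟩)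
      · exact hxy
      · rw [h1, hab, h2]
      · rw [h1, ← hab, h2]
  · have hne : pvRt rep (pvSlot n a) ≠ pvRt rep (pvSlot n b) := by
      rw [← hvra, ← hvrb]; exact heq
    have main : ∀ p q : Int,
        (p = pvRt rep (pvSlot n a) ∧ q = pvRt rep (pvSlot n b)) ∨
        (p = pvRt rep (pvSlot n b) ∧ q = pvRt rep (pvSlot n a)) →
        pvUF n (PySem.List.pySetD s2.1 q p) ∧
        ∀ x y, pvCanon n x → pvCanon n y →
          (pvRt (PySem.List.pySetD s2.1 q p) x = pvRt (PySem.List.pySetD s2.1 q p) y ↔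
            (pvRt rep x = pvRt rep y ∨
             (pvRt rep x = pvRt rep (pvSlot n a) ∧ pvRt rep (pvSlot n b) = pvRt rep y) ∨
             (pvRt rep x = pvRt rep (pvSlot n b) ∧ pvRt rep (pvSlot n a) = pvRt rep y))) := by
      intro p q hor
      have hpc : pvCanon n p := by rcases hor with ⟨h1,_⟩|⟨h1,_⟩ <;> rw [h1] <;> assumption
      have hqc : pvCanon n q := by rcases hor with ⟨_,h2⟩|⟨_,h2⟩ <;> rw [h2] <;> assumption
      have hrootp : pvIsRoot s2.1 p := by rcases hor with ⟨h1,_⟩|⟨h1,_⟩ <;> rw [h1] <;> assumption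
      have hrootq : pvIsRoot s2.1 q := by rcases hor with ⟨_,h2⟩|⟨_,h2⟩ <;> rw [h2] <;> assumption
      have hpq : p ≠ q := by
        rcases hor with ⟨h1,h2⟩|⟨h1,h2⟩
        · rw [h1, h2]; exact hne
        · rw [h1, h2]; exact hne.symm
      obtain ⟨hUF3, hRt3⟩ := pvLink hUF2 hpc hqc hrootp hrootq hpq
      refine ⟨hUF3, ?_⟩
      intro x y hx hy
      rw [hRt3 x hx, hRt3 y hy, hpres12 x hx, hpres12 y hy, pvLink_iff hpq]
      rcases hor with ⟨h1,h2⟩|⟨h1,h2⟩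
      · rw [h1, h2]
      · rw [h1, h2]
        constructor
        · rintro (c|⟨c1,c2⟩|⟨c1,c2⟩)
          · exact Or.inl c
          · exact Or.inr (Or.inr ⟨c1, c2⟩)
          · exact Or.inr (Or.inl ⟨c1, c2⟩)
        · rintro (c|⟨c1,c2⟩|⟨c1,c2⟩)
          · exact Or.inl c
          · exact Or.inr (Or.inr ⟨c1, c2⟩)
          · exact Or.inr (Or.inl ⟨c1, c2⟩)
    rw [hmerge, if_neg heq]
    by_cases hsz : PySem.List.pyGetD sz s2.2 0 > PySem.List.pyGetD sz s1.2 0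
    · simp only [if_pos hsz]
      exact main s2.2 s1.2 (Or.inr ⟨hvrb, hvra⟩)
    · simp only [if_neg hsz]
      exact main s1.2 s2.2 (Or.inl ⟨hvra, hvrb⟩)

-- ---- the equivalence closure: generic join lemma ----
theorem pvEqvGen_join {S : Int → Int → Prop} {p q x y : Int} :
    Relation.EqvGen (fun a b => S a b ∨ (a = p ∧ b = q)) x y ↔
      (Relation.EqvGen S x y ∨
       (Relation.EqvGen S x p ∧ Relation.EqvGen S q y) ∨
       (Relation.EqvGen S x q ∧ Relation.EqvGen S p y)) := by
  constructor
  · intro h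
    induction h with
    | rel a b hab =>
      rcases hab with hab | ⟨ha, hb⟩
      · exact Or.inl (Relation.EqvGen.rel a b hab)
      · rw [ha, hb]
        exact Or.inr (Or.inl ⟨Relation.EqvGen.refl p, Relation.EqvGen.refl q⟩)
    | refl a => exact Or.inl (Relation.EqvGen.refl a)
    | symm a b _ ih =>
      rcases ih with c | ⟨c1, c2⟩ | ⟨c1, c2⟩
      · exact Or.inl (Relation.EqvGen.symm _ _ c)
      · exact Or.inr (Or.inr ⟨Relation.EqvGen.symm _ _ c2, Relation.EqvGen.symm _ _ c1⟩)
      · exact Or.inr (Or.inl ⟨Relation.EqvGen.symm _ _ c2, Relation.EqvGen.symm _ _ c1⟩)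
    | trans a b c _ _ ih1 ih2 =>
      rcases ih1 with d | ⟨d1, d2⟩ | ⟨d1, d2⟩ <;> rcases ih2 with e | ⟨e1, e2⟩ | ⟨e1, e2⟩
      · exact Or.inl (Relation.EqvGen.trans _ _ _ d e)
      · exact Or.inr (Or.inl ⟨Relation.EqvGen.trans _ _ _ d e1, e2⟩)
      · exact Or.inr (Or.inr ⟨Relation.EqvGen.trans _ _ _ d e1, e2⟩)
      · exact Or.inr (Or.inl ⟨d1, Relation.EqvGen.trans _ _ _ d2 e⟩)
      · exact Or.inl (Relation.EqvGen.trans _ _ _ d1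
          (Relation.EqvGen.trans _ _ _ (Relation.EqvGen.symm _ _ e1)
            (Relation.EqvGen.trans _ _ _ (Relation.EqvGen.symm _ _ d2) e2)))
      · exact Or.inl (Relation.EqvGen.trans _ _ _ d1 e2)
      · exact Or.inr (Or.inr ⟨d1, Relation.EqvGen.trans _ _ _ d2 e⟩)
      · exact Or.inl (Relation.EqvGen.trans _ _ _ d1 e2)
      · exact Or.inl (Relation.EqvGen.trans _ _ _ d1
          (Relation.EqvGen.trans _ _ _ (Relation.EqvGen.symm _ _ e1)
            (Relation.EqvGen.trans _ _ _ (Relation.EqvGen.symm _ _ d2) e2)))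
  · have hmono : ∀ u v, Relation.EqvGen S u v →
        Relation.EqvGen (fun a b => S a b ∨ (a = p ∧ b = q)) u v := by
      intro u v huv
      exact Relation.EqvGen.mono (fun a b hab => Or.inl hab) huv
    have hpq : Relation.EqvGen (fun a b => S a b ∨ (a = p ∧ b = q)) p q :=
      Relation.EqvGen.rel p q (Or.inr ⟨rfl, rfl⟩)
    rintro (c | ⟨c1, c2⟩ | ⟨c1, c2⟩)
    · exact hmono _ _ c
    · exact Relation.EqvGen.trans _ _ _ (hmono _ _ c1)
        (Relation.EqvGen.trans _ _ _ hpq (hmono _ _ c2))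
    · exact Relation.EqvGen.trans _ _ _ (hmono _ _ c1)
        (Relation.EqvGen.trans _ _ _ (Relation.EqvGen.symm _ _ hpq) (hmono _ _ c2))

theorem pvConn_append {n : Int} (E : List (List Int)) (e : List Int) (x y : Int) :
    pvConn n (E ++ [e]) x y ↔
      (pvConn n E x y ∨
       (pvConn n E x (pvSlot n (pvE0 e)) ∧ pvConn n E (pvSlot n (pvE1 e)) y) ∨
       (pvConn n E x (pvSlot n (pvE1 e)) ∧ pvConn n E (pvSlot n (pvE0 e)) y)) := by
  have hrel : ∀ a b, pvPR n (E ++ [e]) a b ↔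
      (pvPR n E a b ∨ (a = pvSlot n (pvE0 e) ∧ b = pvSlot n (pvE1 e))) := by
    intro a b
    unfold pvPR
    constructor
    · rintro ⟨f, hf, h1, h2⟩
      rcases List.mem_append.1 hf with hf | hf
      · exact Or.inl ⟨f, hf, h1, h2⟩
      · rcases List.mem_singleton.1 hf with rfl
        exact Or.inr ⟨h1, h2⟩
    · rintro (⟨f, hf, h1, h2⟩ | ⟨h1, h2⟩)
      · exact ⟨f, List.mem_append.2 (Or.inl hf), h1, h2⟩
      · exact ⟨e, List.mem_append.2 (Or.inr (List.mem_singleton.2 rfl)), h1, h2⟩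
  unfold pvConn
  rw [show (Relation.EqvGen (pvPR n (E ++ [e])) x y ↔
      Relation.EqvGen (fun a b => pvPR n E a b ∨ (a = pvSlot n (pvE0 e) ∧ b = pvSlot n (pvE1 e))) x y) from
    ⟨Relation.EqvGen.mono (fun a b hab => (hrel a b).1 hab),
     Relation.EqvGen.mono (fun a b hab => (hrel a b).2 hab)⟩]
  exact pvEqvGen_join

theorem pvConn_congr {n : Int} {E1 E2 : List (List Int)} (h : ∀ e, e ∈ E1 ↔ e ∈ E2) :
    ∀ x y, pvConn n E1 x y ↔ pvConn n E2 x y := by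
  intro x y
  have hrel : ∀ a b, pvPR n E1 a b ↔ pvPR n E2 a b := by
    intro a b
    unfold pvPR
    constructor
    · rintro ⟨f, hf, h1, h2⟩; exact ⟨f, (h f).1 hf, h1, h2⟩
    · rintro ⟨f, hf, h1, h2⟩; exact ⟨f, (h f).2 hf, h1, h2⟩
  exact ⟨Relation.EqvGen.mono (fun a b hab => (hrel a b).1 hab),
         Relation.EqvGen.mono (fun a b hab => (hrel a b).2 hab)⟩

theorem pvConn_nil {n : Int} (x y : Int) : pvConn n [] x y ↔ x = y := by
  constructor
  · intro h
    induction h with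
    | rel a b hab => rcases hab with ⟨f, hf, _⟩; simp at hf
    | refl a => rfl
    | symm a b _ ih => exact ih.symm
    | trans a b c _ _ ih1 ih2 => exact ih1.trans ih2
  · rintro rfl; exact Relation.EqvGen.refl x

theorem pvConn_symm {n : Int} {E : List (List Int)} {x y : Int} (h : pvConn n E x y) :
    pvConn n E y x := Relation.EqvGen.symm x y h
theorem pvConn_trans {n : Int} {E : List (List Int)} {x y z : Int} (h1 : pvConn n E x y)
    (h2 : pvConn n E y z) : pvConn n E x z := Relation.EqvGen.trans x y z h1 h2

-- ---- B side: the labelling fold realises pvConn ----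
theorem pvGetD_map_canon {n : Int} {label : List Int} (hl : (label.length : Int) = n)
    {x : Int} (hx : pvCanon n x) (f : Int → Int) :
    PySem.List.pyGetD (label.map f) x 0 = f (PySem.List.pyGetD label x 0) := by
  have hl2 : ((label.map f).length : Int) = n := by simpa using hl
  rw [pvGetD_canon hl2 hx, pvGetD_canon hl hx]
  have hlt : x.toNat < label.length := by obtain ⟨a,b⟩ := hx; omega
  rw [List.getD_eq_getElem _ _ (by simpa using hlt), List.getD_eq_getElem _ _ hlt, List.getElem_map]

theorem pvB_fold {n d : Int} :
    ∀ (el2 : List (List Int)) (processed : List (List Int)) (label : List Int),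
    (∀ e ∈ el2, pvKey e < d → pvInR n (pvE0 e) ∧ pvInR n (pvE1 e)) →
    ((label.length : Int) = n) →
    (∀ x ∈ label, 0 ≤ x ∧ x < n) →
    (∀ x y, pvCanon n x → pvCanon n y →
       (PySem.List.pyGetD label x 0 = PySem.List.pyGetD label y 0 ↔
        pvConn n (processed.filter (fun e => decide (pvKey e < d))) x y)) →
    (((el2.foldl (pvStep d) label).length : Int) = n) ∧
    (∀ x ∈ el2.foldl (pvStep d) label, 0 ≤ x ∧ x < n) ∧
    (∀ x y, pvCanon n x → pvCanon n y →
       (PySem.List.pyGetD (el2.foldl (pvStep d) label) x 0 =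
          PySem.List.pyGetD (el2.foldl (pvStep d) label) y 0 ↔
        pvConn n ((processed ++ el2).filter (fun e => decide (pvKey e < d))) x y)) := by
  intro el2
  induction el2 with
  | nil =>
    intro processed label hel hlen hent hinv
    simpa using ⟨hlen, hent, hinv⟩
  | cons e rest ih =>
    intro processed label hel hlen hent hinv
    have hel_rest : ∀ f ∈ rest, pvKey f < d → pvInR n (pvE0 f) ∧ pvInR n (pvE1 f) :=
      fun f hf => hel f (List.mem_cons_of_mem _ hf)
    have hassoc : processed ++ e :: rest = (processed ++ [e]) ++ rest := by simp
    rw [List.foldl_cons, hassoc]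
    by_cases hkey : PySem.List.pyGetD e 2 0 < d
    · have hel_e := hel e (List.mem_cons_self) hkey
      have hel0 : pvInR n (PySem.List.pyGetD e 0 0) := hel_e.1
      have hel1 : pvInR n (PySem.List.pyGetD e 1 0) := hel_e.2
      have hsa : pvCanon n (pvSlot n (pvE0 e)) := pvSlot_canon hel_e.1
      have hsb : pvCanon n (pvSlot n (pvE1 e)) := pvSlot_canon hel_e.2
      have hla : PySem.List.pyGetD label (PySem.List.pyGetD e 0 0) 0 =
          PySem.List.pyGetD label (pvSlot n (pvE0 e)) 0 := pvGetD_wrap hlen hel0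
      have hlb : PySem.List.pyGetD label (PySem.List.pyGetD e 1 0) 0 =
          PySem.List.pyGetD label (pvSlot n (pvE1 e)) 0 := pvGetD_wrap hlen hel1
      have hfilter_pe : (processed ++ [e]).filter (fun f => decide (pvKey f < d)) =
          processed.filter (fun f => decide (pvKey f < d)) ++ [e] := by
        rw [List.filter_append]; simp [pvKey, hkey]
      by_cases heqlab : PySem.List.pyGetD label (PySem.List.pyGetD e 0 0) 0 =
          PySem.List.pyGetD label (PySem.List.pyGetD e 1 0) 0
      · -- both endpoints already in the same class: label unchanged
        have hstep : pvStep d label e = label := by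
          unfold pvStep
          rw [if_pos hkey, if_neg (not_ne_iff.mpr heqlab)]
        rw [hstep]
        have hconnab : pvConn n (processed.filter (fun f => decide (pvKey f < d)))
            (pvSlot n (pvE0 e)) (pvSlot n (pvE1 e)) := by
          refine (hinv _ _ hsa hsb).1 ?_
          rw [← hla, ← hlb]; exact heqlab
        refine ih (processed ++ [e]) label hel_rest hlen hent ?_
        intro x y hx hy
        rw [hfilter_pe, pvConn_append]
        rw [hinv x y hx hy]
        constructor
        · exact fun c => Or.inl c
        · rintro (c | ⟨c1, c2⟩ | ⟨c1, c2⟩)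
          · exact c
          · exact pvConn_trans c1 (pvConn_trans hconnab c2)
          · exact pvConn_trans c1 (pvConn_trans (pvConn_symm hconnab) c2)
      · -- relabel the lb class to la
        have hstep : pvStep d label e = label.map
            (fun x => if x = PySem.List.pyGetD label (PySem.List.pyGetD e 1 0) 0
                      then PySem.List.pyGetD label (PySem.List.pyGetD e 0 0) 0 else x) := by
          unfold pvStep
          rw [if_pos hkey, if_pos heqlab]
        rw [hstep]
        set la := PySem.List.pyGetD label (PySem.List.pyGetD e 0 0) 0 with hladef
        set lb := PySem.List.pyGetD label (PySem.List.pyGetD e 1 0) 0 with hlbdef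
        have hlen' : ((label.map (fun x => if x = lb then la else x)).length : Int) = n := by
          simpa using hlen
        have hent' : ∀ x ∈ label.map (fun x => if x = lb then la else x), 0 ≤ x ∧ x < n := by
          intro x hx
          rcases List.mem_map.1 hx with ⟨w, hw, hwx⟩
          rw [← hwx]
          by_cases hwlb : w = lb
          · rw [if_pos hwlb, hla]
            exact hent _ (pvGetD_mem_of_canon hlen hsa)
          · rw [if_neg hwlb]
            exact hent _ hw
        refine ih (processed ++ [e]) _ hel_rest hlen' hent' ?_
        intro x y hx hy
        rw [pvGetD_map_canon hlen hx, pvGetD_map_canon hlen hy, hfilter_pe, pvConn_append]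
        rw [pvLink_iff heqlab]
        have e1 : ∀ z, pvCanon n z → (PySem.List.pyGetD label z 0 = la ↔
            pvConn n (processed.filter (fun f => decide (pvKey f < d))) z (pvSlot n (pvE0 e))) := by
          intro z hz
          rw [hla]; exact hinv z _ hz hsa
        have e2 : ∀ z, pvCanon n z → (PySem.List.pyGetD label z 0 = lb ↔
            pvConn n (processed.filter (fun f => decide (pvKey f < d))) z (pvSlot n (pvE1 e))) := by
          intro z hz
          rw [hlb]; exact hinv z _ hz hsb
        rw [hinv x y hx hy]
        constructor
        · rintro (c | ⟨c1, c2⟩ | ⟨c1, c2⟩)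
          · exact Or.inl c
          · exact Or.inr (Or.inl ⟨(e1 x hx).1 c1, pvConn_symm ((e2 y hy).1 c2.symm)⟩)
          · exact Or.inr (Or.inr ⟨(e2 x hx).1 c1, pvConn_symm ((e1 y hy).1 c2.symm)⟩)
        · rintro (c | ⟨c1, c2⟩ | ⟨c1, c2⟩)
          · exact Or.inl c
          · exact Or.inr (Or.inl ⟨(e1 x hx).2 c1, ((e2 y hy).2 (pvConn_symm c2)).symm⟩)
          · exact Or.inr (Or.inr ⟨(e2 x hx).2 c1, ((e1 y hy).2 (pvConn_symm c2)).symm⟩)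
    · -- edge ignored
      have hstep : pvStep d label e = label := by
        unfold pvStep; rw [if_neg hkey]
      have hfilter_pe : (processed ++ [e]).filter (fun f => decide (pvKey f < d)) =
          processed.filter (fun f => decide (pvKey f < d)) := by
        rw [List.filter_append]; simp [pvKey, hkey]
      rw [hstep]
      refine ih (processed ++ [e]) label hel_rest hlen hent ?_
      intro x y hx hy
      rw [hfilter_pe]
      exact hinv x y hx hy

-- ---- the initial state: list(range(n)) ----
theorem pvRange_len {n : Int} (hn : 0 < n) : ((PySem.List.pyRange 0 n 1).length : Int) = n := by
  rw [PySem.List.pyRange_of_pos 0 n one_pos, if_pos (by omega : (0:Int) < n)]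
  simp [show n - 0 + 1 - 1 = n by ring, Int.ediv_one]
  omega

theorem pvRange_getD {n x : Int} (hn : 0 < n) (hx : pvCanon n x) :
    PySem.List.pyGetD (PySem.List.pyRange 0 n 1) x 0 = x := by
  rw [pvGetD_canon (pvRange_len hn) hx,
      PySem.List.pyRange_of_pos 0 n one_pos, if_pos (by omega : (0:Int) < n)]
  have hcnt : ((n - 0 + 1 - 1) / 1).toNat = n.toNat := by
    rw [show n - 0 + 1 - 1 = n by ring, Int.ediv_one]
  rw [hcnt]
  have hlt : x.toNat < n.toNat := by obtain ⟨a,b⟩ := hx; omega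
  rw [List.getD_eq_getElem _ _ (by simpa using hlt), List.getElem_map, List.getElem_range]
  obtain ⟨a,b⟩ := hx
  push_cast
  omega

theorem pvRange_mem {n x : Int} (h : x ∈ PySem.List.pyRange 0 n 1) : 0 ≤ x ∧ x < n := by
  have := PySem.List.mem_pyRange_one.1 h
  exact this

-- ---- B's per-query answer is connectivity below the query limit ----
theorem pvAns_spec {n : Int} (el : List (List Int)) (q : List Int)
    (hel : ∀ e ∈ el, pvKey e < PySem.List.pyGetD q 2 0 → pvInR n (pvE0 e) ∧ pvInR n (pvE1 e))
    (hu : pvInR n (PySem.List.pyGetD q 0 0)) (hv : pvInR n (PySem.List.pyGetD q 1 0)) :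
    pvAns n el q = true ↔ pvConn n (el.filter (fun e => decide (pvKey e < PySem.List.pyGetD q 2 0)))
      (pvSlot n (PySem.List.pyGetD q 0 0)) (pvSlot n (PySem.List.pyGetD q 1 0)) := by
  have hn : 0 < n := by obtain ⟨a, b⟩ := hu; omega
  have hlen0 := pvRange_len hn
  have hinv0 : ∀ x y, pvCanon n x → pvCanon n y →
      (PySem.List.pyGetD (PySem.List.pyRange 0 n 1) x 0 =
         PySem.List.pyGetD (PySem.List.pyRange 0 n 1) y 0 ↔
       pvConn n (([] : List (List Int)).filter
         (fun e => decide (pvKey e < PySem.List.pyGetD q 2 0))) x y) := by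
    intro x y hx hy
    rw [pvRange_getD hn hx, pvRange_getD hn hy]
    simp only [List.filter_nil]
    exact (pvConn_nil x y).symm
  obtain ⟨hlen', hent', hinv'⟩ :=
    pvB_fold (d := PySem.List.pyGetD q 2 0) el [] (PySem.List.pyRange 0 n 1)
      hel hlen0 (fun x hx => pvRange_mem hx) hinv0
  unfold pvAns
  simp only [decide_eq_true_eq]
  rw [pvGetD_wrap hlen' hu, pvGetD_wrap hlen' hv]
  have := hinv' (pvSlot n (PySem.List.pyGetD q 0 0)) (pvSlot n (PySem.List.pyGetD q 1 0))
    (pvSlot_canon hu) (pvSlot_canon hv)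
  simpa using this

-- ---- the A-side while loop merges exactly the next prefix ----
theorem pvWhile_spec {n : Int} (el : List (List Int)) (d : Int)
    (hel : ∀ e ∈ el, pvKey e < d → pvInR n (pvE0 e) ∧ pvInR n (pvE1 e)) :
    ∀ (f : Nat) (rep sz : List Int) (idx : Int),
    pvUF n rep → 0 ≤ idx → idx ≤ (el.length : Int) →
    ((el.length : Int) - idx ≤ (f : Int)) →
    (∀ x y, pvCanon n x → pvCanon n y →
      (pvRt rep x = pvRt rep y ↔ pvConn n (el.take idx.toNat) x y)) →
    pvUF n (pvWhile f el d rep sz idx).1 ∧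
    idx ≤ (pvWhile f el d rep sz idx).2.2 ∧
    (pvWhile f el d rep sz idx).2.2 ≤ (el.length : Int) ∧
    (∀ x y, pvCanon n x → pvCanon n y →
      (pvRt (pvWhile f el d rep sz idx).1 x = pvRt (pvWhile f el d rep sz idx).1 y ↔
       pvConn n (el.take (pvWhile f el d rep sz idx).2.2.toNat) x y)) ∧
    (∀ e, e ∈ el.take (pvWhile f el d rep sz idx).2.2.toNat → e ∈ el.take idx.toNat ∨ pvKey e < d) ∧
    ((pvWhile f el d rep sz idx).2.2 = (el.length : Int) ∨
      ¬ (pvKey (PySem.List.pyGetD el (pvWhile f el d rep sz idx).2.2 []) < d)) := by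
  intro f
  induction f with
  | zero =>
    intro rep sz idx hUF h0 hle hfuel hinv
    have hidxlen : idx = (el.length : Int) := by push_cast at hfuel; omega
    have e0 : pvWhile 0 el d rep sz idx = (rep, sz, idx) := rfl
    rw [e0]
    exact ⟨hUF, le_refl _, hle, hinv, fun e he => Or.inl he, Or.inl hidxlen⟩
  | succ f ih =>
    intro rep sz idx hUF h0 hle hfuel hinv
    by_cases hcond : idx < (el.length : Int) ∧
        PySem.List.pyGetD (PySem.List.pyGetD el idx []) 2 0 < d
    · obtain ⟨hc1, hc2⟩ := hcond
      have hidxlt : idx.toNat < el.length := by omega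
      have hget : PySem.List.pyGetD el idx [] = el[idx.toNat] :=
        PySem.List.pyGetD_eq_getElem el [] h0 hc1
      have hmem : el[idx.toNat] ∈ el := List.getElem_mem hidxlt
      have hee := hel _ hmem (by unfold pvKey; rw [← hget]; exact hc2)
      have hstep : pvWhile (f+1) el d rep sz idx =
          pvWhile f el d (pvMerge rep sz (PySem.List.pyGetD (PySem.List.pyGetD el idx []) 0 0)
            (PySem.List.pyGetD (PySem.List.pyGetD el idx []) 1 0)).1
            (pvMerge rep sz (PySem.List.pyGetD (PySem.List.pyGetD el idx []) 0 0)
             (PySem.List.pyGetD (PySem.List.pyGetD el idx []) 1 0)).2 (idx + 1) := by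
        simp only [pvWhile]; rw [if_pos ⟨hc1, hc2⟩]
      obtain ⟨hUFm, hiffm⟩ := pvMerge_spec rep sz
        (PySem.List.pyGetD (PySem.List.pyGetD el idx []) 0 0)
        (PySem.List.pyGetD (PySem.List.pyGetD el idx []) 1 0) hUF
        (by rw [hget]; exact hee.1) (by rw [hget]; exact hee.2)
      have hinr0 : pvInR n (pvE0 (PySem.List.pyGetD el idx [])) := by rw [hget]; exact hee.1
      have hinr1 : pvInR n (pvE1 (PySem.List.pyGetD el idx [])) := by rw [hget]; exact hee.2
      have hsca : pvCanon n (pvSlot n (pvE0 (PySem.List.pyGetD el idx []))) := pvSlot_canon hinr0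
      have hscb : pvCanon n (pvSlot n (pvE1 (PySem.List.pyGetD el idx []))) := pvSlot_canon hinr1
      have htake : el.take ((idx+1).toNat) = el.take idx.toNat ++ [el[idx.toNat]] := by
        have h1 : (idx+1).toNat = idx.toNat + 1 := by omega
        rw [h1, List.take_succ, List.getElem?_eq_getElem hidxlt]
        rfl
      have htake' : el.take ((idx+1).toNat) = el.take idx.toNat ++ [PySem.List.pyGetD el idx []] := by
        rw [hget]; exact htake
      have hinvm : ∀ x y, pvCanon n x → pvCanon n y →
          (pvRt (pvMerge rep sz (PySem.List.pyGetD (PySem.List.pyGetD el idx []) 0 0)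
              (PySem.List.pyGetD (PySem.List.pyGetD el idx []) 1 0)).1 x =
           pvRt (pvMerge rep sz (PySem.List.pyGetD (PySem.List.pyGetD el idx []) 0 0)
              (PySem.List.pyGetD (PySem.List.pyGetD el idx []) 1 0)).1 y ↔
           pvConn n (el.take (idx+1).toNat) x y) := by
        intro x y hx hy
        rw [hiffm x y hx hy, htake', pvConn_append]
        simp only [pvE0_eq, pvE1_eq]
        rw [hinv x y hx hy, hinv x _ hx hsca, hinv _ y hscb hy, hinv x _ hx hscb,
            hinv _ y hsca hy]
      obtain ⟨c1, c2, c3, c4, c5, c6⟩ := ih _ _ (idx+1) hUFm (by omega) (by omega)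
        (by push_cast; push_cast at hfuel; omega) hinvm
      rw [hstep]
      refine ⟨c1, by omega, c3, c4, ?_, c6⟩
      intro e he
      rcases c5 e he with hin | hkey
      · rw [htake] at hin
        rcases List.mem_append.1 hin with hin | hin
        · exact Or.inl hin
        · rcases List.mem_singleton.1 hin with rfl
          refine Or.inr ?_
          unfold pvKey
          rw [← hget]
          exact hc2
      · exact Or.inr hkey
    · have hstep : pvWhile (f+1) el d rep sz idx = (rep, sz, idx) := by
        simp only [pvWhile]; rw [if_neg hcond]
      rw [hstep]
      refine ⟨hUF, le_refl _, hle, hinv, fun e he => Or.inl he, ?_⟩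
      rcases not_and_or.1 hcond with hc | hc
      · refine Or.inl ?_
        show idx = (el.length : Int)
        omega
      · exact Or.inr hc
-- ---- sorted prefix = filter, as sets ----
theorem pvTake_filter {el : List (List Int)} (hsort : el.Pairwise (fun a b => pvKey a ≤ pvKey b))
    {k d : Int} (h0 : 0 ≤ k) (hk : k ≤ (el.length : Int))
    (hold : ∀ e ∈ el.take k.toNat, pvKey e < d)
    (hstop : k = (el.length : Int) ∨ ¬ (pvKey (PySem.List.pyGetD el k []) < d)) :
    ∀ e, e ∈ el.take k.toNat ↔ e ∈ el.filter (fun e => decide (pvKey e < d)) := by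
  intro e
  constructor
  · intro he
    exact List.mem_filter.2 ⟨List.mem_of_mem_take he, by simpa using hold e he⟩
  · intro he
    obtain ⟨hmem, hkey⟩ := List.mem_filter.1 he
    have hkey' : pvKey e < d := by simpa using hkey
    obtain ⟨i, hi, hie⟩ := List.mem_iff_getElem.1 hmem
    by_cases hik : i < k.toNat
    · refine List.mem_iff_getElem.2 ⟨i, by simp; omega, ?_⟩
      rw [List.getElem_take]
      exact hie
    · exfalso
      have hklen : k < (el.length : Int) := by
        rcases eq_or_lt_of_le hk with heq | hlt
        · omega
        · exact hlt
      have hstop' : ¬ (pvKey (PySem.List.pyGetD el k []) < d) := by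
        rcases hstop with h | h
        · omega
        · exact h
      have hgetk : PySem.List.pyGetD el k [] = el[k.toNat] :=
        PySem.List.pyGetD_eq_getElem el [] h0 (by omega)
      rw [hgetk] at hstop'
      rcases Nat.eq_or_lt_of_le (Nat.le_of_not_lt hik) with heq | hlt
      · simp only [heq, hie] at hstop'
        exact hstop' hkey'
      · have := List.pairwise_iff_getElem.1 hsort k.toNat i (by omega) hi hlt
        rw [hie] at this
        omega

-- ---- ordering on the sorted 4-tuples ----
theorem pvLex_head_le (a b : Int) (t1 t2 : List Int) (h : (a::t1) ≤ (b::t2)) : a ≤ b := by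
  rcases h with h | h
  · cases h; exact le_refl a
  · cases h with
    | rel h => exact le_of_lt h
    | cons => exact le_refl a

theorem pvBool_eq_of_iff {b c : Bool} (h : (b = true) ↔ (c = true)) : b = c := by
  rcases b <;> rcases c <;> simp_all

-- ---- the main sweep: A's fold over the sorted queries fills res with B's answers ----
theorem pvSweep {n : Int} (edgeList : List (List Int)) (queries : List (List Int))
    (el : List (List Int))
    (hsortEl : el.Pairwise (fun a b => pvKey a ≤ pvKey b))
    (hmemEl : ∀ e, e ∈ el ↔ e ∈ edgeList)
    (hel : ∀ e ∈ el, (pvInR n (pvE0 e) ∧ pvInR n (pvE1 e)) ∨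
        (∀ q ∈ queries, PySem.List.pyGetD q 2 0 ≤ pvKey e))
    (hPreQ : ∀ q ∈ queries, pvInR n (pvE0 q) ∧ pvInR n (pvE1 q)) :
    ∀ (qrem : List (List Int)) (rep sz : List Int) (idx : Int) (res : List Bool),
    (∀ t ∈ qrem, ∃ (j : Nat) (hj : j < queries.length),
        t = [pvKey queries[j], pvE0 queries[j], pvE1 queries[j], (j : Int)]) →
    qrem.Pairwise (· ≤ ·) →
    (qrem.map (fun t => PySem.List.pyGetD t 3 0)).Nodup →
    pvUF n rep → 0 ≤ idx → idx ≤ (el.length : Int) →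
    (∀ x y, pvCanon n x → pvCanon n y →
      (pvRt rep x = pvRt rep y ↔ pvConn n (el.take idx.toNat) x y)) →
    (∀ e ∈ el.take idx.toNat, ∀ t ∈ qrem, pvKey e < PySem.List.pyGetD t 0 0) →
    res.length = queries.length →
    ((qrem.foldl (pvQStep el) (rep, sz, idx, res)).2.2.2.length = queries.length ∧
     ∀ (j : Nat) (_hj : j < queries.length),
      ((qrem.foldl (pvQStep el) (rep, sz, idx, res)).2.2.2[j]? =
        (if (j : Int) ∈ qrem.map (fun t => PySem.List.pyGetD t 3 0)
         then some (pvAns n edgeList queries[j]) else res[j]?))) := by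
  intro qrem
  induction qrem with
  | nil =>
    intro rep sz idx res _ _ _ _ _ _ _ _ hres
    rw [List.foldl_nil]
    exact ⟨hres, fun j hj => by simp⟩
  | cons t qrem' ih =>
    intro rep sz idx res hq4 hsorted hnodup hUF h0 hle hinv hold hres
    obtain ⟨j, hj, ht⟩ := hq4 t (List.mem_cons_self)
    obtain ⟨hqu, hqv⟩ := hPreQ queries[j] (List.getElem_mem hj)
    -- run the while loop
    have helj : ∀ e ∈ el, pvKey e < pvKey queries[j] →
        pvInR n (pvE0 e) ∧ pvInR n (pvE1 e) := by
      intro e he hk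
      rcases hel e he with hok | hbig
      · exact hok
      · exfalso
        have := hbig queries[j] (List.getElem_mem hj)
        rw [pvKey_eq] at this
        omega
    obtain ⟨hUFw, hw1, hw2, hinvw, hneww, hstopw⟩ :=
      pvWhile_spec el (pvKey queries[j]) helj el.length rep sz idx hUF h0 hle
        (by push_cast; omega) hinv
    set w := pvWhile el.length el (pvKey queries[j]) rep sz idx with hwdef
    have hw0 : 0 ≤ w.2.2 := le_trans h0 hw1
    have holdw : ∀ e ∈ el.take w.2.2.toNat, pvKey e < pvKey queries[j] := by
      intro e he
      rcases hneww e he with hin | hkey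
      · have h1 := hold e hin t List.mem_cons_self
        have h2 : PySem.List.pyGetD t 0 0 = pvKey queries[j] := by rw [ht]; rfl
        omega
      · exact hkey
    have htf := pvTake_filter hsortEl hw0 hw2 holdw hstopw
    -- the two finds
    obtain ⟨hUF1, hlen1, hval1, hpres1⟩ := pvFind_spec' w.1 (pvE0 queries[j]) hUFw hqu
    set f1 := pvFind (w.1.length + 1) w.1 (pvE0 queries[j]) with hf1def
    obtain ⟨hUF2, hlen2, hval2, hpres2⟩ := pvFind_spec' f1.1 (pvE1 queries[j]) hUF1 hqv
    set f2 := pvFind (f1.1.length + 1) f1.1 (pvE1 queries[j]) with hf2def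
    have hsu : pvCanon n (pvSlot n (pvE0 queries[j])) := pvSlot_canon hqu
    have hsv : pvCanon n (pvSlot n (pvE1 queries[j])) := pvSlot_canon hqv
    -- the computed boolean is B's answer
    have hbool : decide (f1.2 = f2.2) = pvAns n edgeList queries[j] := by
      apply pvBool_eq_of_iff
      rw [decide_eq_true_eq]
      rw [pvAns_spec edgeList queries[j]
        (fun e he hk => helj e ((hmemEl e).2 he) (by rw [← pvKey_eq queries[j]]; exact hk)) hqu hqv]
      rw [hval1, hval2, hpres1 _ hsv]
      rw [hinvw _ _ hsu hsv]
      rw [pvConn_congr htf]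
      exact pvConn_congr (fun e => by
        rw [List.mem_filter, List.mem_filter, hmemEl e, pvKey_eq]) _ _
    -- one step of the fold
    have hstate : (t :: qrem').foldl (pvQStep el) (rep, sz, idx, res) =
        qrem'.foldl (pvQStep el)
          (f2.1, w.2.1, w.2.2, PySem.List.pySetD res ((j : Int)) (decide (f1.2 = f2.2))) := by
      rw [List.foldl_cons]
      congr 1
      rw [ht]
      rfl
    rw [hstate]
    -- set res[j]
    have hsetres : PySem.List.pySetD res ((j : Int)) (decide (f1.2 = f2.2)) =
        res.set j (decide (f1.2 = f2.2)) := by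
      simp
    -- invariant for the recursive call
    have hinv2 : ∀ x y, pvCanon n x → pvCanon n y →
        (pvRt f2.1 x = pvRt f2.1 y ↔ pvConn n (el.take w.2.2.toNat) x y) := by
      intro x y hx hy
      rw [hpres2 x hx, hpres2 y hy, hpres1 x hx, hpres1 y hy]
      exact hinvw x y hx hy
    have hold2 : ∀ e ∈ el.take w.2.2.toNat, ∀ t' ∈ qrem', pvKey e < PySem.List.pyGetD t' 0 0 := by
      intro e he t' ht'
      obtain ⟨j', hj', ht'eq⟩ := hq4 t' (List.mem_cons_of_mem _ ht')
      have hlex : t ≤ t' := (List.pairwise_cons.1 hsorted).1 t' ht'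
      rw [ht, ht'eq] at hlex
      have hdd := pvLex_head_le _ _ _ _ hlex
      have hkey : pvKey e < pvKey queries[j] := holdw e he
      have he' : PySem.List.pyGetD t' 0 0 = pvKey queries[j'] := by rw [ht'eq]; rfl
      rw [he']
      omega
    have hnodup' := (List.nodup_cons.1 hnodup).2
    have hjnotin : PySem.List.pyGetD t 3 0 ∉ qrem'.map (fun t => PySem.List.pyGetD t 3 0) :=
      (List.nodup_cons.1 hnodup).1
    have htj : PySem.List.pyGetD t 3 0 = (j : Int) := by rw [ht]; rfl
    obtain ⟨hlenF, hresF⟩ := ih f2.1 w.2.1 w.2.2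
      (res.set j (decide (f1.2 = f2.2)))
      (fun t' ht' => hq4 t' (List.mem_cons_of_mem _ ht'))
      (List.pairwise_cons.1 hsorted).2 hnodup' hUF2 hw0 hw2 hinv2 hold2
      (by rw [List.length_set]; exact hres)
    rw [hsetres]
    refine ⟨hlenF, ?_⟩
    intro j' hj'
    rw [hresF j' hj']
    rw [List.map_cons, htj]
    by_cases hmem : (j' : Int) ∈ qrem'.map (fun t => PySem.List.pyGetD t 3 0)
    · rw [if_pos hmem, if_pos (List.mem_cons_of_mem _ hmem)]
    · rw [if_neg hmem]
      by_cases hjj : j' = j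
      · subst hjj
        rw [if_pos (List.mem_cons_self)]
        rw [List.getElem?_set_self (by omega), hbool]
      · have hne : (j' : Int) ≠ (j : Int) := by exact_mod_cast hjj
        rw [if_neg (by
          intro hmem2
          rcases List.mem_cons.1 hmem2 with hc | hc
          · exact hne hc
          · exact hmem hc)]
        rw [List.getElem?_set_ne (by omega)]

-- ===== VERDICT (by name: the statement is the Claim_ definition above) =====
theorem distanceLimitedPathsExist_spec : Claim_equal_distanceLimitedPathsExist := by
  intro n edgeList queries _hDom hPre
  unfold Spec_distanceLimitedPathsExist
  obtain ⟨hPreE, hPreQ⟩ := hPre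
  have hB : distanceLimitedPathsExist_alt n edgeList queries = queries.map (pvAns n edgeList) := by
    unfold distanceLimitedPathsExist_alt
    rw [PySem.List.foldl_append_singleton_eq_map (pvAns n edgeList) queries []]
    rfl
  by_cases hq : queries = []
  · subst hq
    rfl
  · -- some query exists, so n ≥ 1
    obtain ⟨q0, hq0⟩ := List.exists_mem_of_ne_nil queries hq
    have hn : 0 < n := by
      have := (hPreQ q0 hq0).2.1
      obtain ⟨a, b⟩ := this
      omega
    set el := PySem.List.sorted edgeList (fun x => PySem.List.pyGetD x 2 0) false with heldef
    set qt := (PySem.List.enumerate queries 0).map (fun p =>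
        [PySem.List.pyGetD p.2 2 0, PySem.List.pyGetD p.2 0 0, PySem.List.pyGetD p.2 1 0, p.1]) with hqtdef
    set qs := @PySem.List.sorted _ _ LinearOrder.toPartialOrder.toPreorder.toLT
        LinearOrder.toDecidableLT qt (fun x => x) false with hqsdef
    have hA : distanceLimitedPathsExist n edgeList queries =
        (qs.foldl (pvQStep el)
          (PySem.List.pyRange 0 n 1, PySem.List.pyRepeat [1] n, 0,
           PySem.List.pyRepeat [false] (qs.length : Int))).2.2.2 := rfl
    -- facts about el
    have hmemEl : ∀ e, e ∈ el ↔ e ∈ edgeList := fun e =>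
      PySem.List.mem_sorted edgeList _ false e
    have hsortEl : el.Pairwise (fun a b => pvKey a ≤ pvKey b) :=
      PySem.List.sorted_pairwise edgeList (fun x => PySem.List.pyGetD x 2 0)
    have hel : ∀ e ∈ el, (pvInR n (pvE0 e) ∧ pvInR n (pvE1 e)) ∨
        (∀ q ∈ queries, PySem.List.pyGetD q 2 0 ≤ pvKey e) := by
      intro e he
      exact (hPreE e ((hmemEl e).1 he)).2
    -- facts about qs
    have hq4 : ∀ t ∈ qs, ∃ (j : Nat) (hj : j < queries.length),
        t = [pvKey queries[j], pvE0 queries[j], pvE1 queries[j], (j : Int)] := by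
      intro t ht
      have ht2 : t ∈ qt := (@PySem.List.mem_sorted _ _ LinearOrder.toPartialOrder.toPreorder.toLT
        LinearOrder.toDecidableLT qt (fun x => x) false t).1 ht
      rw [hqtdef] at ht2
      obtain ⟨p, hp, hpt⟩ := List.mem_map.1 ht2
      obtain ⟨k, hk, hpk⟩ := (PySem.List.mem_enumerate_iff queries 0 p).1 hp
      refine ⟨k, hk, ?_⟩
      rw [← hpt, hpk]
      simp [pvKey, pvE0, pvE1]
    have hsorted : qs.Pairwise (· ≤ ·) := by
      have := @PySem.List.sorted_pairwise _ _ _ qt (fun x => x)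
      simpa using this
    have hmapqt : qt.map (fun t => PySem.List.pyGetD t 3 0) =
        PySem.List.pyRange 0 (queries.length : Int) 1 := by
      rw [hqtdef, List.map_map]
      have : ((fun t => PySem.List.pyGetD t 3 0) ∘ (fun p : Int × List Int =>
          [PySem.List.pyGetD p.2 2 0, PySem.List.pyGetD p.2 0 0, PySem.List.pyGetD p.2 1 0, p.1]))
          = (fun p : Int × List Int => p.1) := rfl
      rw [this, PySem.List.map_fst_enumerate]
      norm_num
    have hpermmap : (qs.map (fun t => PySem.List.pyGetD t 3 0)).Perm
        (PySem.List.pyRange 0 (queries.length : Int) 1) := by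
      rw [← hmapqt]
      exact (@PySem.List.sorted_perm _ _ LinearOrder.toPartialOrder.toPreorder.toLT
        LinearOrder.toDecidableLT qt (fun x => x) false).map _
    have hnodup : (qs.map (fun t => PySem.List.pyGetD t 3 0)).Nodup := by
      rw [hpermmap.nodup_iff]
      rw [← hmapqt, hqtdef, List.map_map]
      have : ((fun t => PySem.List.pyGetD t 3 0) ∘ (fun p : Int × List Int =>
          [PySem.List.pyGetD p.2 2 0, PySem.List.pyGetD p.2 0 0, PySem.List.pyGetD p.2 1 0, p.1]))
          = (fun p : Int × List Int => p.1) := rfl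
      rw [this]
      exact List.Pairwise.imp (fun h => ne_of_lt h)
        ((List.pairwise_map).2 (PySem.List.pairwise_lt_enumerate queries 0))
    -- the initial union-find state
    have hUF0 : pvUF n (PySem.List.pyRange 0 n 1) := by
      refine ⟨⟨pvRange_len hn, fun x hx => pvRange_mem hx⟩, ?_⟩
      intro x hx
      exact ⟨0, by unfold pvIsRoot pvIter; exact pvRange_getD hn hx⟩
    have hinv0 : ∀ x y, pvCanon n x → pvCanon n y →
        (pvRt (PySem.List.pyRange 0 n 1) x = pvRt (PySem.List.pyRange 0 n 1) y ↔
         pvConn n (el.take (0 : Int).toNat) x y) := by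
      intro x y hx hy
      have hroot : ∀ z, pvCanon n z → pvRt (PySem.List.pyRange 0 n 1) z = z := by
        intro z hz
        exact pvRt_of_isRoot hUF0 hz (pvRange_getD hn hz)
      rw [hroot x hx, hroot y hy]
      exact (pvConn_nil x y).symm
    have hres0 : (PySem.List.pyRepeat [false] (qs.length : Int)).length = queries.length := by
      rw [PySem.List.pyRepeat_singleton, List.length_replicate]
      rw [hqsdef, @PySem.List.length_sorted _ _ LinearOrder.toPartialOrder.toPreorder.toLT
          LinearOrder.toDecidableLT qt (fun x => x) false, hqtdef, List.length_map,
          PySem.List.length_enumerate]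
      omega
    obtain ⟨hlenF, hresF⟩ := pvSweep edgeList queries el hsortEl hmemEl hel
      (fun q hq => ⟨(hPreQ q hq).2.1, (hPreQ q hq).2.2⟩)
      qs (PySem.List.pyRange 0 n 1) (PySem.List.pyRepeat [1] n) 0
      (PySem.List.pyRepeat [false] (qs.length : Int))
      hq4 hsorted hnodup hUF0 (le_refl 0) (by positivity) hinv0
      (by intro e he _ _; simp at he) hres0
    rw [hA, hB]
    apply List.ext_getElem?
    intro j
    by_cases hj : j < queries.length
    · rw [hresF j hj]
      have hcov : (j : Int) ∈ qs.map (fun t => PySem.List.pyGetD t 3 0) := by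
        rw [hpermmap.mem_iff, PySem.List.mem_pyRange_one]
        constructor
        · positivity
        · exact_mod_cast hj
      rw [if_pos hcov, List.getElem?_map, List.getElem?_eq_getElem hj]
      rfl
    · rw [List.getElem?_eq_none (by omega), List.getElem?_eq_none (by rw [List.length_map]; omega)]
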